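-- pv_equiv track=rewrite | github.com/ksu00/pasimap | src/modules/ali.py | ali_to_dense_ali
-- ===== SOURCE A (Python) =====
-- from typing import Tuple
--
-- def ali_to_dense_ali(
--         ali: Tuple[str, str]
--         ) -> Tuple[str, str]:
--     """\
--     Remove gap-gap-pairs from input alignment.
--
--     :param ali:
--         Tuple: alignment
--         - str: sequence A
--         - str: sequence B
--
--         The alignment may contain gaps.
--         The alignment may contain gap-gap-pairs.
--
--     :return:
--         Tuple: alignment
--         - str: sequence A
--         - str: sequence B
--
--         The alignment may contain gaps.
--         The alignment does NOT contain gap-gap-pairs.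
--     """
--     # Unpack the 2 sequences of the input alignment.
--     seq_a, seq_b = ali
--
--     # Initialise results.
--     seq_a_dense = ''
--     seq_b_dense = ''
--
--     # For each aligned pair.
--     for el_a, el_b in zip(seq_a, seq_b):
--
--         # If it is a gap-gap-pair.
--         if el_a == '-' and el_b == '-':
--             # Ignore this pair.
--             pass
--
--         # If it is NOT a gap-gap-pair.
--         else:
--             # Update results.
--             seq_a_dense += el_a
--             seq_b_dense += el_b
--
--     # Return result.
--     return (seq_a_dense, seq_b_dense)
-- ===== SOURCE B (Python) =====
-- from typing import Tuple
--
-- def ali_to_dense_ali(ali: Tuple[str, str]) -> Tuple[str, str]: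
--     seq_a, seq_b = ali
--     n = min(len(seq_a), len(seq_b))
--     # Compute the gap positions of each sequence separately, intersect them
--     # to get the gap-gap columns, and rebuild both sequences from the
--     # surviving column indices.
--     gaps_a = {i for i in range(n) if seq_a[i] == '-'}
--     gaps_b = {i for i in range(n) if seq_b[i] == '-'}
--     drop = gaps_a & gaps_b
--     keep = [i for i in range(n) if i not in drop]
--     return (''.join(seq_a[i] for i in keep), ''.join(seq_b[i] for i in keep))
-- ===== Notes on version B (the rewrite author's own statement) =====
-- stated objective: alternative
-- what changed: B computes the gap-index set of each sequence separately, intersects them to obtain the gap-gap columns, and rebuilds both output strings by indexing the surviving column positions, instead of A's single streaming pass over zipped character pairs that grows two accumulator strings.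
import Mathlib
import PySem

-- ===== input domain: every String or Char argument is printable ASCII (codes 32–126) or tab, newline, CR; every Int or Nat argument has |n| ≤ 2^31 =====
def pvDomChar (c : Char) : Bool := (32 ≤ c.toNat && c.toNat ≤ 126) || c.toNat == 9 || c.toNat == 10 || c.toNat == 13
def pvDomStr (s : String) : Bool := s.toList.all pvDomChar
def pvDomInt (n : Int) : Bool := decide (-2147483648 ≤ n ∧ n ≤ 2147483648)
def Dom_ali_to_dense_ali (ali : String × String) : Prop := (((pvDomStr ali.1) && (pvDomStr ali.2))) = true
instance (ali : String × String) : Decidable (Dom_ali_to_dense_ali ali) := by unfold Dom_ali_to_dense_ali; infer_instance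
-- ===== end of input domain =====

-- B: computes each sequence's gap-index set, intersects them to find gap-gap columns, and rebuilds both strings by indexing the kept positions (alternative decomposition, same result).


-- ===== PORT A =====
-- Port of A: one pass over the zipped pairs, appending to two accumulators.
def aLoop (ps : List (Char × Char)) (accA accB : List Char) : List Char × List Char :=
  match ps with
  | [] => (accA, accB)
  | (a, b) :: rest =>
    if a = '-' ∧ b = '-' then aLoop rest accA accB
    else aLoop rest (accA ++ [a]) (accB ++ [b])

def ali_to_dense_ali (ali : String × String) : String × String :=
  let r := aLoop (ali.1.toList.zip ali.2.toList) [] []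
  (String.ofList r.1, String.ofList r.2)

-- ===== PORT B =====
-- Port of B: the gap-index sets are nodup ascending index lists (Python's set
-- comprehensions over range(n) yield exactly these distinct elements); `&` is
-- the intersection filter, `i not in drop` is membership; the outputs are
-- rebuilt by indexing the kept column positions.
def ali_to_dense_ali_alt (ali : String × String) : String × String :=
  let la := ali.1.toList
  let lb := ali.2.toList
  let n := min la.length lb.length
  let gapsA := (List.range n).filter (fun i => la.getD i ' ' = '-')
  let gapsB := (List.range n).filter (fun i => lb.getD i ' ' = '-')
  let drop := gapsA.filter (fun i => i ∈ gapsB)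
  let keep := (List.range n).filter (fun i => ¬ i ∈ drop)
  (String.ofList (keep.map (fun i => la.getD i ' ')),
   String.ofList (keep.map (fun i => lb.getD i ' ')))

-- ===== PRECONDITION & SPEC =====
def Spec_ali_to_dense_ali (ali : String × String) (out : String × String) : Prop := out = ali_to_dense_ali_alt ali
instance (ali : String × String) (out : String × String) : Decidable (Spec_ali_to_dense_ali ali out) := by unfold Spec_ali_to_dense_ali; infer_instance

-- ===== CLAIM (what is proved, stated in full; the proofs are below) =====
def Claim_equal_ali_to_dense_ali : Prop := ∀ (ali : String × String), Dom_ali_to_dense_ali ali → Spec_ali_to_dense_ali ali (ali_to_dense_ali ali)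

-- ===== LEMMAS AND PROOFS =====

-- A's loop equals the filtered zip, unzipped.
theorem aLoop_eq (ps : List (Char × Char)) (accA accB : List Char) :
    aLoop ps accA accB =
      (accA ++ (ps.filter (fun p => !(p.1 = '-' && p.2 = '-'))).map Prod.fst,
       accB ++ (ps.filter (fun p => !(p.1 = '-' && p.2 = '-'))).map Prod.snd) := by
  induction ps generalizing accA accB with
  | nil => simp [aLoop]
  | cons hd rest ih =>
    obtain ⟨a, b⟩ := hd
    by_cases h : a = '-' ∧ b = '-'
    · simp [aLoop, h, ih]
    · have h' := not_and_or.mp h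
      simp [aLoop, h, ih, List.filter_cons, if_pos h']

-- Index-level filter-and-map over range equals filter-and-map over the list itself.
theorem rangeFilterMapGetD {α β : Type} (xs : List α) (d : α) (q : α → Bool) (g : α → β) :
    ((List.range xs.length).filter (fun i => q (xs.getD i d))).map (fun i => g (xs.getD i d))
      = (xs.filter q).map g := by
  induction xs with
  | nil => simp
  | cons x xs ih =>
    simp only [List.length_cons, List.range_succ_eq_map, List.filter_cons,
      List.getD_cons_zero, List.filter_map, Function.comp_def,
      List.getD_cons_succ]
    by_cases h : q x = true
    · simpa [h, List.getD] using congrArg (List.cons (g x)) (by simpa [List.getD] using ih)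
    · simpa [h, List.getD] using (by simpa [List.getD] using ih)

-- B's kept-index pipeline, mapped through any positionwise reading of the columns,
-- equals the filtered zip mapped through the corresponding projection.
theorem altKeepMap (la lb : List Char) (f : Nat → Char) (g : Char × Char → Char)
    (hf : ∀ i, i < (la.zip lb).length → f i = g ((la.zip lb).getD i (' ', ' '))) :
    (((List.range (min la.length lb.length)).filter
        (fun i => ¬ i ∈ (((List.range (min la.length lb.length)).filter
              (fun i => la.getD i ' ' = '-')).filter
            (fun i => i ∈ (List.range (min la.length lb.length)).filter
              (fun i => lb.getD i ' ' = '-'))))).map f)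
      = ((la.zip lb).filter (fun p => !(p.1 = '-' && p.2 = '-'))).map g := by
  have hn : min la.length lb.length = (la.zip lb).length := (List.length_zip ..).symm
  set ps := la.zip lb with hps
  rw [hn]
  have hkeep : (List.range ps.length).filter
      (fun i => ¬ i ∈ (((List.range ps.length).filter (fun i => la.getD i ' ' = '-')).filter
          (fun i => i ∈ (List.range ps.length).filter (fun i => lb.getD i ' ' = '-'))))
      = (List.range ps.length).filter
          (fun i => !((ps.getD i (' ', ' ')).1 = '-' && (ps.getD i (' ', ' ')).2 = '-')) := by
    apply List.filter_congr
    intro i hi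
    have hilt : i < ps.length := List.mem_range.mp hi
    have hla : i < la.length := lt_of_lt_of_le hilt (by rw [hps, List.length_zip]; omega)
    have hlb : i < lb.length := lt_of_lt_of_le hilt (by rw [hps, List.length_zip]; omega)
    have h1 : ps.getD i (' ', ' ') = (la.getD i ' ', lb.getD i ' ') := by
      rw [List.getD_eq_getElem _ _ hilt, List.getD_eq_getElem _ _ hla,
        List.getD_eq_getElem _ _ hlb]
      simp [hps]
    simp only [h1, List.mem_filter, List.mem_range, hilt]
    by_cases ha : la.getD i ' ' = '-' <;> by_cases hb : lb.getD i ' ' = '-' <;>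
      simp
  rw [hkeep]
  rw [List.map_congr_left (fun i hi => hf i (List.mem_range.mp (List.mem_filter.mp hi).1))]
  exact rangeFilterMapGetD ps (' ', ' ') (fun p => !(p.1 = '-' && p.2 = '-')) g

-- ===== VERDICT (by name: the statement is the Claim_ definition above) =====
theorem ali_to_dense_ali_spec : Claim_equal_ali_to_dense_ali := by
  intro ali _
  unfold Spec_ali_to_dense_ali ali_to_dense_ali ali_to_dense_ali_alt
  simp only [aLoop_eq, List.nil_append]
  have h1 := altKeepMap ali.1.toList ali.2.toList
    (fun i => ali.1.toList.getD i ' ') Prod.fst (fun i hi => by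
      have hla : i < ali.1.toList.length := lt_of_lt_of_le hi (by rw [List.length_zip]; omega)
      show ali.1.toList.getD i ' ' = _
      rw [List.getD_eq_getElem _ _ hi, List.getD_eq_getElem _ _ hla]
      simp)
  have h2 := altKeepMap ali.1.toList ali.2.toList
    (fun i => ali.2.toList.getD i ' ') Prod.snd (fun i hi => by
      have hlb : i < ali.2.toList.length := lt_of_lt_of_le hi (by rw [List.length_zip]; omega)
      show ali.2.toList.getD i ' ' = _
      rw [List.getD_eq_getElem _ _ hi, List.getD_eq_getElem _ _ hlb]
      simp)
  rw [h1, h2]
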